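-- pv_equiv track=rewrite | github.com/FabianJennrich/Fairness-in-Network-Anonymisation | twoStep.py | greedyGrouping
-- ===== SOURCE A (Python) =====
-- def funcI(degSeq, i, j):
--     ''' returns the result of function I(d[i,j]) defined in the paper. We assume degSeq of form [(nodeID, nodeDeg)] sorted highest deg to lowest deg. If i and j are indices of deqSeq then:
--     I(d[i,j]) = sum_{l=i}^{j} (d(i)-d(l)) -> do j+1 so that index j is included
--     '''
--     return degSeq[i][1]*(j+1-i) - sum([item[1] for item in degSeq[i:j+1]])
--
-- def greedyGrouping(degSeq, k):
--     '''a greedy method for determining the partition of degSeq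
--     this should allow it to run with more vertices and not crash b/c of reaching max recursion depth.
--     '''
--     ## degSeq = list of (node, degree)
--     degSeqGrouped = []
--     degDict = {}
--     group = []
--     ##currentTargetDeg
--     cTD = degSeq[0][1] ## deg of largest deg node
--     for i in range(len(degSeq)):
--         if len(group) < k:        ## if group too small
--             group.append(degSeq[i])
--             degDict[degSeq[i][0]] = cTD
--         elif i +1+k > len(degSeq)-1:   ## if there arent enough to make another full group, add to prev group
--             group.append(degSeq[i])
--             degDict[degSeq[i][0]] = cTD
--         else:
--             Cmerge = (cTD - degSeq[i][1]) + funcI(degSeq, i+1, i+1+k)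
--             Cnew = funcI(degSeq, i, i+k)
--             if Cmerge > Cnew: ## make new group starting at i
--                 degSeqGrouped.append(group)
--                 group = [degSeq[i]]
--                 cTD = degSeq[i][1]
--                 degDict[degSeq[i][0]] = cTD
--             else:
--                 group.append(degSeq[i])
--                 degDict[degSeq[i][0]] = cTD
--     degSeqGrouped.append(group)
--     return degDict
-- ===== SOURCE B (Python) =====
-- def greedyGrouping(degSeq, k):
--     """Prefix sums of the degrees make each cost term I(d[i,j]) an O(1) lookup, and
--     only the current group's start index is tracked (no group/grouped lists)."""
--     n = len(degSeq)
--     pre = [0]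
--     for item in degSeq:
--         pre.append(pre[-1] + item[1])
--     degDict = {}
--     start = 0  # index where the current group begins; target degree = degSeq[start][1]
--     for i in range(n):
--         if i - start >= k and i + 1 + k <= n - 1:
--             cmerge = (degSeq[start][1] - degSeq[i][1]) \
--                 + degSeq[i + 1][1] * (k + 1) - (pre[i + 2 + k] - pre[i + 1])
--             cnew = degSeq[i][1] * (k + 1) - (pre[i + 1 + k] - pre[i])
--             if cmerge > cnew:
--                 start = i
--         degDict[degSeq[i][0]] = degSeq[start][1]
--     return degDict
-- ===== Notes on version B (the rewrite author's own statement) =====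
-- stated objective: faster
-- what changed: B precomputes one prefix-sum list of the degrees so each cost term I(d[i,j]) is an O(1) arithmetic lookup, and tracks only the current group's start index instead of maintaining group/grouped lists, turning A's O(n*k) loop into O(n).
import Mathlib
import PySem

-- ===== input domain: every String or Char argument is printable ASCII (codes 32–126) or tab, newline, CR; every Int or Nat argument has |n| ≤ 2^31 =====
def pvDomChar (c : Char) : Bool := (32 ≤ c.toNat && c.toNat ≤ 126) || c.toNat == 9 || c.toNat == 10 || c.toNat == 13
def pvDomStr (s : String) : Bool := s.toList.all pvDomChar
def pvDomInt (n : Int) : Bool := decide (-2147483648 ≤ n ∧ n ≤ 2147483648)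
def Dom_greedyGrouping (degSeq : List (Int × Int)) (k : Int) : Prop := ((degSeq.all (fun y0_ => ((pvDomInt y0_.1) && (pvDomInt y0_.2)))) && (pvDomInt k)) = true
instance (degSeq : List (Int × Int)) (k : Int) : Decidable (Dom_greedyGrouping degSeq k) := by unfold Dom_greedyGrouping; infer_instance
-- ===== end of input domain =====

-- B replaces A's per-step O(k) degree sums by a precomputed prefix-sum list and keeps only the
-- group-start index (no group lists): an asymptotically faster (O(n) vs O(n*k)) exact re-implementation.

-- ===== PORT A =====
def funcIA (degSeq : List (Int × Int)) (i j : Int) : Int :=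
  (PySem.List.pyGetD degSeq i (0, 0)).2 * (j + 1 - i)
    - ((PySem.List.slice degSeq (some i) (some (j + 1))).map (fun item => item.2)).sum

def stepA (degSeq : List (Int × Int)) (k : Int)
    (s : List (List (Int × Int)) × PySem.Dict Int Int × List (Int × Int) × Int) (i : Int) :
    List (List (Int × Int)) × PySem.Dict Int Int × List (Int × Int) × Int :=
  let grouped := s.1
  let dict := s.2.1
  let group := s.2.2.1
  let cTD := s.2.2.2
  let di := PySem.List.pyGetD degSeq i (0, 0)
  if (group.length : Int) < k then
    (grouped, dict.insert di.1 cTD, group ++ [di], cTD)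
  else if i + 1 + k > (degSeq.length : Int) - 1 then
    (grouped, dict.insert di.1 cTD, group ++ [di], cTD)
  else
    let cmerge := (cTD - di.2) + funcIA degSeq (i + 1) (i + 1 + k)
    let cnew := funcIA degSeq i (i + k)
    if cmerge > cnew then
      (grouped ++ [group], dict.insert di.1 di.2, [di], di.2)
    else
      (grouped, dict.insert di.1 cTD, group ++ [di], cTD)

def greedyGrouping (degSeq : List (Int × Int)) (k : Int) : List (Int × Int) :=
  let cTD0 := (PySem.List.pyGetD degSeq 0 (0, 0)).2
  let final := (PySem.List.pyRange 0 (degSeq.length : Int) 1).foldl (stepA degSeq k)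
    ([], PySem.Dict.empty, [], cTD0)
  -- Python appends the last group to degSeqGrouped and then returns degDict (grouped is dead for the result)
  let _degSeqGrouped := final.1 ++ [final.2.2.1]
  final.2.1.items

-- ===== PORT B =====
def preSums (degSeq : List (Int × Int)) : List Int :=
  degSeq.foldl (fun acc item => acc ++ [PySem.List.pyGetD acc (-1) 0 + item.2]) [0]

def stepB (degSeq : List (Int × Int)) (k : Int) (pre : List Int)
    (s : PySem.Dict Int Int × Int) (i : Int) : PySem.Dict Int Int × Int :=
  let dict := s.1
  let start := s.2
  let n := (degSeq.length : Int)
  let start' :=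
    if k ≤ i - start ∧ i + 1 + k ≤ n - 1 then
      let cmerge := ((PySem.List.pyGetD degSeq start (0, 0)).2 - (PySem.List.pyGetD degSeq i (0, 0)).2)
        + (PySem.List.pyGetD degSeq (i + 1) (0, 0)).2 * (k + 1)
        - (PySem.List.pyGetD pre (i + 2 + k) 0 - PySem.List.pyGetD pre (i + 1) 0)
      let cnew := (PySem.List.pyGetD degSeq i (0, 0)).2 * (k + 1)
        - (PySem.List.pyGetD pre (i + 1 + k) 0 - PySem.List.pyGetD pre i 0)
      if cmerge > cnew then i else start
    else start
  (dict.insert (PySem.List.pyGetD degSeq i (0, 0)).1 (PySem.List.pyGetD degSeq start' (0, 0)).2, start')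

def greedyGrouping_alt (degSeq : List (Int × Int)) (k : Int) : List (Int × Int) :=
  let pre := preSums degSeq
  let final := (PySem.List.pyRange 0 (degSeq.length : Int) 1).foldl (stepB degSeq k pre)
    (PySem.Dict.empty, 0)
  final.1.items

-- ===== PRECONDITION & SPEC =====
-- A raises IndexError on empty degSeq (degSeq[0]) and, for every nonempty degSeq, on every k < 0
-- (the last iteration always reaches funcI(degSeq, n, n+k) and indexes degSeq[n]); Pre_ excludes exactly those.
def Pre_greedyGrouping (degSeq : List (Int × Int)) (k : Int) : Prop := degSeq ≠ [] ∧ 0 ≤ k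
instance (degSeq : List (Int × Int)) (k : Int) : Decidable (Pre_greedyGrouping degSeq k) := by
  unfold Pre_greedyGrouping; infer_instance

def pvWitness_greedyGrouping : (List (Int × Int)) × Int := ([(1, 5), (2, 4), (3, 4), (4, 1)], 2)

def Spec_greedyGrouping (degSeq : List (Int × Int)) (k : Int) (out : List (Int × Int)) : Prop := out = greedyGrouping_alt degSeq k
instance (degSeq : List (Int × Int)) (k : Int) (out : List (Int × Int)) : Decidable (Spec_greedyGrouping degSeq k out) := by unfold Spec_greedyGrouping; infer_instance

-- ===== CLAIM (what is proved, stated in full; the proofs are below) =====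
def Claim_equal_greedyGrouping : Prop := ∀ (degSeq : List (Int × Int)) (k : Int), Dom_greedyGrouping degSeq k → Pre_greedyGrouping degSeq k → Spec_greedyGrouping degSeq k (greedyGrouping degSeq k)

-- ===== LEMMAS AND PROOFS =====

def preFun (degSeq : List (Int × Int)) (t : Nat) : Int := ((degSeq.take t).map Prod.snd).sum

theorem preSums_eq (degSeq : List (Int × Int)) :
    preSums degSeq = (List.range (degSeq.length + 1)).map (preFun degSeq) := by
  induction degSeq using List.reverseRecOn with
  | nil => simp [preSums, preFun]
  | append_singleton l x ih =>
    unfold preSums at *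
    rw [List.foldl_append, ih]
    simp only [List.foldl_cons, List.foldl_nil, List.length_append, List.length_singleton]
    conv_rhs => rw [List.range_succ, List.map_append]
    congr 1
    · apply List.map_congr_left
      intro t ht
      simp only [List.mem_range] at ht
      simp [preFun, List.take_append_of_le_length (by omega : t ≤ l.length)]
    · have hne : (List.range (l.length + 1)).map (preFun l) ≠ [] := by simp
      rw [PySem.List.pyGetD_neg_one _ _ hne]
      have h2 : ((List.range (l.length + 1)).map (preFun l)).getLast hne
          = preFun l l.length := by
        rw [List.getLast_eq_getElem]
        simp
      rw [h2]
      simp [preFun]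

theorem preSums_get (degSeq : List (Int × Int)) (t : Nat) (ht : t ≤ degSeq.length) :
    PySem.List.pyGetD (preSums degSeq) (t : Int) 0 = preFun degSeq t := by
  rw [preSums_eq, PySem.List.pyGetD_natCast]
  rw [List.getD_eq_getElem?_getD]
  simp [List.getElem?_map, List.getElem?_range (by omega : t < degSeq.length + 1)]

theorem slice_sum (degSeq : List (Int × Int)) (a c : Nat) (hac : a ≤ c) (_hc : c ≤ degSeq.length) :
    ((PySem.List.slice degSeq (some (a : Int)) (some (c : Int))).map (fun item => item.2)).sum
      = preFun degSeq c - preFun degSeq a := by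
  rw [PySem.List.slice_natCast]
  have hsplit : degSeq.take c = degSeq.take a ++ (degSeq.drop a).take (c - a) := by
    rw [← List.take_add]
    congr 1
    omega
  unfold preFun
  rw [hsplit, List.map_append, List.sum_append]
  ring

theorem funcIA_eq (degSeq : List (Int × Int)) (i j : Nat) (hij : i ≤ j + 1)
    (hj : j + 1 ≤ degSeq.length) :
    funcIA degSeq (i : Int) (j : Int)
      = (PySem.List.pyGetD degSeq (i : Int) (0, 0)).2 * ((j : Int) + 1 - i)
        - (PySem.List.pyGetD (preSums degSeq) ((j : Int) + 1) 0
            - PySem.List.pyGetD (preSums degSeq) (i : Int) 0) := by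
  unfold funcIA
  have hcast : ((j : Int) + 1) = ((j + 1 : Nat) : Int) := by push_cast; ring
  rw [hcast, slice_sum degSeq i (j + 1) hij hj, preSums_get degSeq (j + 1) hj,
      preSums_get degSeq i (by omega)]

theorem funcIA_eq' (degSeq : List (Int × Int)) (i j : Int) (hi : 0 ≤ i) (hj0 : 0 ≤ j)
    (hij : i ≤ j + 1) (hj : j + 1 ≤ (degSeq.length : Int)) :
    funcIA degSeq i j
      = (PySem.List.pyGetD degSeq i (0, 0)).2 * (j + 1 - i)
        - (PySem.List.pyGetD (preSums degSeq) (j + 1) 0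
            - PySem.List.pyGetD (preSums degSeq) i 0) := by
  obtain ⟨a, rfl⟩ := Int.eq_ofNat_of_zero_le hi
  obtain ⟨b, rfl⟩ := Int.eq_ofNat_of_zero_le hj0
  exact funcIA_eq degSeq a b (by omega) (by omega)

theorem loop_eq (degSeq : List (Int × Int)) (k : Int) (hk : 0 ≤ k) :
    ∀ (fuel m start : Nat) (grouped : List (List (Int × Int))) (dict : PySem.Dict Int Int)
      (group : List (Int × Int)),
      degSeq.length - m ≤ fuel → m ≤ degSeq.length → start ≤ m → group.length = m - start →
      (((PySem.List.pyRange (m : Int) (degSeq.length : Int) 1).foldl (stepA degSeq k)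
          (grouped, dict, group, (PySem.List.pyGetD degSeq (start : Int) (0, 0)).2)).2.1)
        = ((PySem.List.pyRange (m : Int) (degSeq.length : Int) 1).foldl
            (stepB degSeq k (preSums degSeq)) (dict, (start : Int))).1 := by
  intro fuel
  induction fuel with
  | zero =>
    intro m start grouped dict group hfuel hm hsm hlen
    have hmn : m = degSeq.length := by omega
    rw [PySem.List.pyRange_one_eq_nil (by exact_mod_cast le_of_eq hmn.symm)]
    simp
  | succ f ih =>
    intro m start grouped dict group hfuel hm hsm hlen
    rcases eq_or_lt_of_le hm with hmn | hmn
    · rw [PySem.List.pyRange_one_eq_nil (by exact_mod_cast le_of_eq hmn.symm)]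
      simp
    · rw [PySem.List.pyRange_one_cons (by exact_mod_cast hmn)]
      rw [List.foldl_cons, List.foldl_cons]
      have hlenInt : ((group.length : Int)) = (m : Int) - (start : Int) := by
        rw [hlen]; omega
      by_cases hc1 : ((m : Int) - (start : Int)) < k
      · -- group too small: both keep start / append
        have hA : stepA degSeq k (grouped, dict, group, (PySem.List.pyGetD degSeq (start : Int) (0, 0)).2) (m : Int)
            = (grouped, dict.insert (PySem.List.pyGetD degSeq (m : Int) (0, 0)).1
                (PySem.List.pyGetD degSeq (start : Int) (0, 0)).2,
               group ++ [PySem.List.pyGetD degSeq (m : Int) (0, 0)],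
               (PySem.List.pyGetD degSeq (start : Int) (0, 0)).2) := by
          simp only [stepA]
          rw [if_pos (by omega : ((group ).length : Int) < k)]
        have hB : stepB degSeq k (preSums degSeq) (dict, (start : Int)) (m : Int)
            = (dict.insert (PySem.List.pyGetD degSeq (m : Int) (0, 0)).1
                (PySem.List.pyGetD degSeq (start : Int) (0, 0)).2, (start : Int)) := by
          simp only [stepB]
          rw [if_neg (by omega : ¬(k ≤ (m : Int) - (start : Int) ∧ (m : Int) + 1 + k ≤ (degSeq.length : Int) - 1))]
        rw [hA, hB]
        have := ih (m + 1) start grouped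
          (dict.insert (PySem.List.pyGetD degSeq (m : Int) (0, 0)).1
            (PySem.List.pyGetD degSeq (start : Int) (0, 0)).2)
          (group ++ [PySem.List.pyGetD degSeq (m : Int) (0, 0)])
          (by omega) (by omega) (by omega) (by simp [hlen]; omega)
        push_cast at this ⊢
        exact this
      · by_cases hc2 : (m : Int) + 1 + k > (degSeq.length : Int) - 1
        · have hA : stepA degSeq k (grouped, dict, group, (PySem.List.pyGetD degSeq (start : Int) (0, 0)).2) (m : Int)
              = (grouped, dict.insert (PySem.List.pyGetD degSeq (m : Int) (0, 0)).1
                  (PySem.List.pyGetD degSeq (start : Int) (0, 0)).2,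
                 group ++ [PySem.List.pyGetD degSeq (m : Int) (0, 0)],
                 (PySem.List.pyGetD degSeq (start : Int) (0, 0)).2) := by
            simp only [stepA]
            rw [if_neg (by omega : ¬((group.length : Int) < k)), if_pos hc2]
          have hB : stepB degSeq k (preSums degSeq) (dict, (start : Int)) (m : Int)
              = (dict.insert (PySem.List.pyGetD degSeq (m : Int) (0, 0)).1
                  (PySem.List.pyGetD degSeq (start : Int) (0, 0)).2, (start : Int)) := by
            simp only [stepB]
            rw [if_neg (by omega : ¬(k ≤ (m : Int) - (start : Int) ∧ (m : Int) + 1 + k ≤ (degSeq.length : Int) - 1))]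
          rw [hA, hB]
          have := ih (m + 1) start grouped
            (dict.insert (PySem.List.pyGetD degSeq (m : Int) (0, 0)).1
              (PySem.List.pyGetD degSeq (start : Int) (0, 0)).2)
            (group ++ [PySem.List.pyGetD degSeq (m : Int) (0, 0)])
            (by omega) (by omega) (by omega) (by simp [hlen]; omega)
          push_cast at this ⊢
          exact this
        · -- the real comparison branch
          replace hc2 : (m : Int) + 1 + k ≤ (degSeq.length : Int) - 1 := by omega
          have hmerge : (PySem.List.pyGetD degSeq (start : Int) (0, 0)).2
                - (PySem.List.pyGetD degSeq (m : Int) (0, 0)).2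
                + funcIA degSeq ((m : Int) + 1) ((m : Int) + 1 + k)
              = ((PySem.List.pyGetD degSeq (start : Int) (0, 0)).2 - (PySem.List.pyGetD degSeq (m : Int) (0, 0)).2)
                + (PySem.List.pyGetD degSeq ((m : Int) + 1) (0, 0)).2 * (k + 1)
                - (PySem.List.pyGetD (preSums degSeq) ((m : Int) + 2 + k) 0
                    - PySem.List.pyGetD (preSums degSeq) ((m : Int) + 1) 0) := by
            rw [funcIA_eq' degSeq ((m : Int) + 1) ((m : Int) + 1 + k) (by omega) (by omega)
                (by omega) (by omega)]
            have h1 : (m : Int) + 1 + k + 1 = (m : Int) + 2 + k := by ring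
            rw [h1]
            have h2 : (m : Int) + 2 + k - ((m : Int) + 1) = k + 1 := by ring
            rw [h2]
            ring
          have hnew : funcIA degSeq (m : Int) ((m : Int) + k)
              = (PySem.List.pyGetD degSeq (m : Int) (0, 0)).2 * (k + 1)
                - (PySem.List.pyGetD (preSums degSeq) ((m : Int) + 1 + k) 0
                    - PySem.List.pyGetD (preSums degSeq) (m : Int) 0) := by
            rw [funcIA_eq' degSeq (m : Int) ((m : Int) + k) (by omega) (by omega)
                (by omega) (by omega)]
            have h1 : (m : Int) + k + 1 = (m : Int) + 1 + k := by ring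
            rw [h1]
            have h2 : (m : Int) + 1 + k - (m : Int) = k + 1 := by ring
            rw [h2]
          set cm := ((PySem.List.pyGetD degSeq (start : Int) (0, 0)).2 - (PySem.List.pyGetD degSeq (m : Int) (0, 0)).2)
            + (PySem.List.pyGetD degSeq ((m : Int) + 1) (0, 0)).2 * (k + 1)
            - (PySem.List.pyGetD (preSums degSeq) ((m : Int) + 2 + k) 0
                - PySem.List.pyGetD (preSums degSeq) ((m : Int) + 1) 0) with hcm
          set cn := (PySem.List.pyGetD degSeq (m : Int) (0, 0)).2 * (k + 1)
            - (PySem.List.pyGetD (preSums degSeq) ((m : Int) + 1 + k) 0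
                - PySem.List.pyGetD (preSums degSeq) (m : Int) 0) with hcn
          by_cases hgt : cm > cn
          · have hA : stepA degSeq k (grouped, dict, group, (PySem.List.pyGetD degSeq (start : Int) (0, 0)).2) (m : Int)
                = (grouped ++ [group], dict.insert (PySem.List.pyGetD degSeq (m : Int) (0, 0)).1
                    (PySem.List.pyGetD degSeq (m : Int) (0, 0)).2,
                   [PySem.List.pyGetD degSeq (m : Int) (0, 0)],
                   (PySem.List.pyGetD degSeq (m : Int) (0, 0)).2) := by
              simp only [stepA]
              rw [if_neg (by omega : ¬((group.length : Int) < k)), if_neg (by omega), hmerge, hnew,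
                  if_pos hgt]
            have hB : stepB degSeq k (preSums degSeq) (dict, (start : Int)) (m : Int)
                = (dict.insert (PySem.List.pyGetD degSeq (m : Int) (0, 0)).1
                    (PySem.List.pyGetD degSeq (m : Int) (0, 0)).2, (m : Int)) := by
              simp only [stepB]
              rw [if_pos (⟨by omega, by omega⟩ : k ≤ (m : Int) - (start : Int) ∧ (m : Int) + 1 + k ≤ (degSeq.length : Int) - 1),
                  if_pos hgt]
            rw [hA, hB]
            have := ih (m + 1) m (grouped ++ [group])
              (dict.insert (PySem.List.pyGetD degSeq (m : Int) (0, 0)).1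
                (PySem.List.pyGetD degSeq (m : Int) (0, 0)).2)
              [PySem.List.pyGetD degSeq (m : Int) (0, 0)]
              (by omega) (by omega) (by omega) (by simp)
            push_cast at this ⊢
            exact this
          · have hA : stepA degSeq k (grouped, dict, group, (PySem.List.pyGetD degSeq (start : Int) (0, 0)).2) (m : Int)
                = (grouped, dict.insert (PySem.List.pyGetD degSeq (m : Int) (0, 0)).1
                    (PySem.List.pyGetD degSeq (start : Int) (0, 0)).2,
                   group ++ [PySem.List.pyGetD degSeq (m : Int) (0, 0)],
                   (PySem.List.pyGetD degSeq (start : Int) (0, 0)).2) := by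
              simp only [stepA]
              rw [if_neg (by omega : ¬((group.length : Int) < k)), if_neg (by omega), hmerge, hnew,
                  if_neg hgt]
            have hB : stepB degSeq k (preSums degSeq) (dict, (start : Int)) (m : Int)
                = (dict.insert (PySem.List.pyGetD degSeq (m : Int) (0, 0)).1
                    (PySem.List.pyGetD degSeq (start : Int) (0, 0)).2, (start : Int)) := by
              simp only [stepB]
              rw [if_pos (⟨by omega, by omega⟩ : k ≤ (m : Int) - (start : Int) ∧ (m : Int) + 1 + k ≤ (degSeq.length : Int) - 1),
                  if_neg hgt]
            rw [hA, hB]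
            have := ih (m + 1) start grouped
              (dict.insert (PySem.List.pyGetD degSeq (m : Int) (0, 0)).1
                (PySem.List.pyGetD degSeq (start : Int) (0, 0)).2)
              (group ++ [PySem.List.pyGetD degSeq (m : Int) (0, 0)])
              (by omega) (by omega) (by omega) (by simp [hlen]; omega)
            push_cast at this ⊢
            exact this

-- ===== VERDICT (by name: the statement is the Claim_ definition above) =====
theorem greedyGrouping_spec : Claim_equal_greedyGrouping := by
  intro degSeq k _ hpre
  unfold Spec_greedyGrouping greedyGrouping greedyGrouping_alt
  have h := loop_eq degSeq k hpre.2 degSeq.length 0 0 [] PySem.Dict.empty []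
    (by omega) (by omega) (by omega) (by simp)
  push_cast at h
  exact congrArg PySem.Dict.items h
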